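-- pv_equiv track=rewrite | github.com/baric058/VO_VE_Converter | vo_ve_converter.py | extend_x_axis
-- ===== SOURCE A (Python) =====
-- def extend_x_axis(values):
--     """Extend RPM axis (X) from 12 columns to 16 using rules for NA/FI."""
--     last_rpm = values[-1]
--     new_x = []
--
--     if last_rpm == 7000:
--         # Classic MS4x-like 320–7000 map extended to 16 cols
--         new_x = values[:8].copy()
--         current = new_x[-1]
--         while len(new_x) < 16:
--             current += 500
--             if current > 7000:
--                 current = 7000
--             new_x.append(current)
--             if current == 7000:
--                 break
--         while len(new_x) < 16:
--             new_x.append(7000)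
--
--     elif last_rpm <= 7500:
--         # Slightly higher rev limit – extend with 500 rpm steps
--         new_x = values[:3].copy()
--         current = new_x[-1]
--         while len(new_x) < 16:
--             current += 500
--             if current > last_rpm:
--                 current = last_rpm
--             new_x.append(current)
--             if current == last_rpm:
--                 break
--         while len(new_x) < 16:
--             new_x.append(last_rpm)
--
--     else:
--         # High-rev setup – custom final steps up to 8000
--         new_x = values[:3].copy()
--         current = new_x[-1]
--         current += 700
--         new_x.append(current)
--         current += 600
--         new_x.append(current)
--
--         while len(new_x) < 16:
--             current += 500
--             if current > 8000:
--                 current = 8000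
--             new_x.append(current)
--             if current == 8000:
--                 break
--         while len(new_x) < 16:
--             new_x.append(8000)
--
--     return new_x
-- ===== SOURCE B (Python) =====
-- def extend_x_axis(values):
--     """Extend RPM axis (X) from 12 columns to 16 using rules for NA/FI."""
--     last_rpm = values[-1]
--     if last_rpm == 7000:
--         prefix, cap, pre_steps = values[:8], 7000, []
--     elif last_rpm <= 7500:
--         prefix, cap, pre_steps = values[:3], last_rpm, []
--     else:
--         prefix, cap, pre_steps = values[:3], 8000, [700, 1300]
--     base = prefix[-1]
--     head = [base + s for s in pre_steps]          # unclamped special steps (+700, +600)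
--     start = base + (pre_steps[-1] if pre_steps else 0)
--     n = 16 - len(prefix) - len(head)
--     tail = [min(start + 500 * (k + 1), cap) for k in range(n)]
--     return prefix + head + tail
-- ===== Notes on version B (the rewrite author's own statement) =====
-- stated objective: simpler
-- what changed: Replaced the clamped accumulator loops, the break, and the second padding loop by a single closed-form comprehension min(start + 500*(k+1), cap) per remaining column, after the three-way branch picks (prefix, cap, special pre-steps).
import Mathlib
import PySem

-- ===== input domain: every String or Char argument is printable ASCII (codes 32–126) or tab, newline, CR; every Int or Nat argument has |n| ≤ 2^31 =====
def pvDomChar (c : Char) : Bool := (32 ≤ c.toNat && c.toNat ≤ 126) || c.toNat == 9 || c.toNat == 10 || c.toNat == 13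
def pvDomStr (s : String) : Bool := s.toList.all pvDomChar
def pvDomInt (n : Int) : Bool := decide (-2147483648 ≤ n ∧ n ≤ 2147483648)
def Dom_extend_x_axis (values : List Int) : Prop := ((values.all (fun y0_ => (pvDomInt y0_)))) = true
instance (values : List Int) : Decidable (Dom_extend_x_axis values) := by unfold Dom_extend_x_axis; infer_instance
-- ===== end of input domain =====

-- B replaces A's clamped accumulator loops, break and padding loop by one closed-form
-- clamped comprehension per remaining column (objective: simpler).

-- ===== PORT A =====
-- the `while len(new_x) < 16:` grow loop; fuel = 16 - new_x.length, one append per iteration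
def pvLoopA (cap : Int) : Nat → Int → List Int → List Int
  | 0, _, acc => acc
  | n+1, current, acc =>
      let c := current + 500
      let c := if c > cap then cap else c
      let acc := acc ++ [c]
      if c = cap then acc else pvLoopA cap n c acc

-- the second `while len(new_x) < 16:` padding loop
def pvPadA (cap : Int) (acc : List Int) : List Int :=
  acc ++ List.replicate (16 - acc.length) cap

def extend_x_axis (values : List Int) : List Int :=
  match PySem.List.pyGet? values (-1) with
  | none => []   -- IndexError on empty input; excluded by Pre_
  | some last_rpm =>
    if last_rpm = 7000 then
      let new_x := PySem.List.slice values none (some 8)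
      let current := (PySem.List.pyGet? new_x (-1)).getD 0   -- new_x nonempty under Pre_
      pvPadA 7000 (pvLoopA 7000 (16 - new_x.length) current new_x)
    else if last_rpm ≤ 7500 then
      let new_x := PySem.List.slice values none (some 3)
      let current := (PySem.List.pyGet? new_x (-1)).getD 0
      pvPadA last_rpm (pvLoopA last_rpm (16 - new_x.length) current new_x)
    else
      let new_x := PySem.List.slice values none (some 3)
      let current := (PySem.List.pyGet? new_x (-1)).getD 0
      let current := current + 700
      let new_x := new_x ++ [current]
      let current := current + 600
      let new_x := new_x ++ [current]
      pvPadA 8000 (pvLoopA 8000 (16 - new_x.length) current new_x)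

-- ===== PORT B =====
def extend_x_axis_alt (values : List Int) : List Int :=
  match PySem.List.pyGet? values (-1) with
  | none => []   -- IndexError on empty input; excluded by Pre_
  | some last_rpm =>
    let (pref, cap, pre_steps) :=
      if last_rpm = 7000 then (PySem.List.slice values none (some 8), (7000:Int), ([] : List Int))
      else if last_rpm ≤ 7500 then (PySem.List.slice values none (some 3), last_rpm, ([] : List Int))
      else (PySem.List.slice values none (some 3), (8000:Int), ([700, 1300] : List Int))
    let base := (PySem.List.pyGet? pref (-1)).getD 0   -- pref nonempty under Pre_
    let head := pre_steps.map (fun s => base + s)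
    let start := base + (pre_steps.getLast?.getD 0)
    let n := 16 - pref.length - head.length
    let tail := (List.range n).map (fun k : Nat => min (start + 500 * ((k : Int) + 1)) cap)
    pref ++ head ++ tail

-- ===== PRECONDITION & SPEC =====
-- Pre_ excludes only the empty list, on which A raises IndexError at its last-element lookup.
def Pre_extend_x_axis (values : List Int) : Prop := values ≠ []
instance (values : List Int) : Decidable (Pre_extend_x_axis values) := by unfold Pre_extend_x_axis; infer_instance
def pvWitness_extend_x_axis : List Int := [300, 700, 1200, 1800, 2500, 3100, 3800, 4500, 5200, 5900, 6500, 7000]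

def Spec_extend_x_axis (values : List Int) (out : List Int) : Prop := out = extend_x_axis_alt values
instance (values : List Int) (out : List Int) : Decidable (Spec_extend_x_axis values out) := by unfold Spec_extend_x_axis; infer_instance

-- ===== CLAIM (what is proved, stated in full; the proofs are below) =====
def Claim_equal_extend_x_axis : Prop := ∀ (values : List Int), Dom_extend_x_axis values → Pre_extend_x_axis values → Spec_extend_x_axis values (extend_x_axis values)

-- ===== LEMMAS AND PROOFS =====

-- a constant range-map is a replicate
theorem pv_map_const {n : Nat} {f : Nat → Int} {c : Int} (h : ∀ k < n, f k = c) :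
    (List.range n).map f = List.replicate n c := by
  induction n with
  | zero => simp
  | succ m ih =>
      rw [List.range_succ, List.map_append]
      rw [ih (fun k hk => h k (Nat.lt_succ_of_lt hk))]
      simp [h m (Nat.lt_succ_self m), List.replicate_succ']

-- the grow loop followed by padding equals the closed-form clamped columns
theorem pv_loop_eq (cap : Int) (fuel : Nat) :
    ∀ (cur : Int) (acc : List Int),
    (pvLoopA cap fuel cur acc) ++
      List.replicate (acc.length + fuel - (pvLoopA cap fuel cur acc).length) cap
    = acc ++ (List.range fuel).map (fun k : Nat => min (cur + 500 * ((k : Int) + 1)) cap) := by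
  induction fuel with
  | zero => intro cur acc; simp [pvLoopA]
  | succ m ih =>
      intro cur acc
      have hc : (if cur + 500 > cap then cap else cur + 500) = min (cur + 500) cap := by
        split <;> omega
      by_cases hbreak : (if cur + 500 > cap then cap else cur + 500) = cap
      · -- clamped / hit the cap: loop breaks, all remaining columns are cap
        have hge : cap ≤ cur + 500 := by
          by_contra h; push Not at h
          rw [if_neg (by omega)] at hbreak; omega
        have : (List.range (m+1)).map (fun k : Nat => min (cur + 500 * ((k : Int) + 1)) cap)
            = List.replicate (m+1) cap := by
          apply pv_map_const
          intro k hk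
          have : cap ≤ cur + 500 * ((k : Int) + 1) := by
            have : (0:Int) ≤ 500 * (k:Int) := by positivity
            omega
          omega
        rw [this]
        simp only [pvLoopA, hbreak, if_true]
        have hlen : (acc ++ [cap]).length = acc.length + 1 := by simp
        rw [hlen]
        have : acc.length + (m + 1) - (acc.length + 1) = m := by omega
        rw [this]
        simp [List.replicate_succ, List.append_assoc]
      · -- no clamp: c = cur + 500 < cap, recurse
        have hlt : cur + 500 < cap := by
          by_contra h; push Not at h
          rcases lt_or_eq_of_le h with h' | h'
          · rw [if_pos h'] at hbreak; exact hbreak rfl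
          · rw [h'] at hbreak; simp at hbreak
        have hcval : (if cur + 500 > cap then cap else cur + 500) = cur + 500 := by
          rw [if_neg (by omega)]
        have hne : ¬ (cur + 500 = cap) := by omega
        simp only [pvLoopA, hcval, if_neg hne]
        have := ih (cur + 500) (acc ++ [cur + 500])
        have hlen : (acc ++ [cur + 500]).length = acc.length + 1 := by simp
        rw [hlen] at this
        have harith : acc.length + 1 + m = acc.length + (m + 1) := by omega
        rw [harith] at this
        rw [this]
        rw [List.range_succ_eq_map, List.map_cons, List.map_map]
        have h0 : min (cur + 500 * ((0:Nat) + 1 : Int)) cap = cur + 500 := by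
          simp; omega
        simp only [Nat.cast_zero] at h0 ⊢
        rw [show ((fun k : Nat => min (cur + 500 * ((k : Int) + 1)) cap) ∘ (fun i => i + 1))
              = (fun k : Nat => min (cur + 500 + 500 * ((k : Int) + 1)) cap) from ?_]
        · simp [List.append_assoc]; omega
        · funext k; simp; ring_nf
  -- reconcile the two affine forms

-- padded loop = prefix ++ closed-form clamped columns
theorem pv_branch (pref : List Int) (cap base : Int) (hlen : pref.length ≤ 16) :
    pvPadA cap (pvLoopA cap (16 - pref.length) base pref)
    = pref ++ (List.range (16 - pref.length)).map
        (fun k : Nat => min (base + 500 * ((k : Int) + 1)) cap) := by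
  unfold pvPadA
  have key := pv_loop_eq cap (16 - pref.length) base pref
  have hL : pref.length + (16 - pref.length) = 16 := by omega
  rw [hL] at key
  exact key

theorem extend_x_axis_spec : Claim_equal_extend_x_axis := by
  intro values hdom hpre
  unfold Spec_extend_x_axis
  cases hg : PySem.List.pyGet? values (-1) with
  | none =>
      rw [PySem.List.pyGet?_neg_one] at hg
      rw [List.getLast?_eq_none_iff] at hg
      exact absurd hg hpre
  | some last =>
      have h8 : PySem.List.slice values none (some 8) = values.take 8 := by
        rw [show ((8:Int)) = ((8:Nat):Int) from by norm_num, PySem.List.slice_to_natCast]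
      have h3 : PySem.List.slice values none (some 3) = values.take 3 := by
        rw [show ((3:Int)) = ((3:Nat):Int) from by norm_num, PySem.List.slice_to_natCast]
      have hl8 : (values.take 8).length ≤ 16 := by
        have := List.length_take_le 8 values; omega
      have hl3 : (values.take 3).length ≤ 16 := by
        have := List.length_take_le 3 values; omega
      simp only [extend_x_axis, extend_x_axis_alt, hg, h8, h3]
      split_ifs with h1 h2
      · -- last = 7000
        rw [pv_branch _ _ _ hl8]
        simp
      · -- last ≤ 7500
        rw [pv_branch _ _ _ hl3]
        simp
      · -- high-rev branch
        set base := (PySem.List.pyGet? (values.take 3) (-1)).getD 0 with hbase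
        have ht := List.length_take_le 3 values
        have hlen2 : ((values.take 3) ++ [base + 700] ++ [base + 700 + 600]).length ≤ 16 := by
          simp only [List.length_append, List.length_cons, List.length_nil]
          omega
        rw [pv_branch _ _ _ hlen2]
        have h1300 : base + 700 + 600 = base + 1300 := by ring
        rw [h1300]
        have hn : 16 - ((values.take 3) ++ [base + 700] ++ [base + 1300]).length
            = 16 - (values.take 3).length - 2 := by
          simp only [List.length_append, List.length_cons, List.length_nil]
          omega
        rw [hn]
        simp [List.append_assoc]
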